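-- pv_equiv track=rewrite | github.com/HippolyteKarakostas/steerlab_tt | gutemberg_catalog_management.py | check_initials
-- ===== SOURCE A (Python) =====
-- def check_initials(potential_initials: str, potential_full_name: str) -> bool:
--     initials = [initial for initial in potential_initials.split(" ") if initial]
--     names = [name for name in potential_full_name.split(" ") if name]
--     if len(initials) == len(names):
--         for initial, name in zip(initials, names):
--             if initial[0] != name[0]:
--                 return False
--         return True
--     return False
-- ===== SOURCE B (Python) =====
-- def check_initials(potential_initials: str, potential_full_name: str) -> bool:
--     left = "".join(i[0] for i in potential_initials.split(" ") if i)
--     right = "".join(n[0] for n in potential_full_name.split(" ") if n)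
--     return left == right
-- ===== Notes on version B (the rewrite author's own statement) =====
-- stated objective: simpler
-- what changed: B joins the first letters of each side's nonempty tokens into two strings and returns a single string equality, replacing A's explicit length check and pairwise early-return zip loop.
import Mathlib
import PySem

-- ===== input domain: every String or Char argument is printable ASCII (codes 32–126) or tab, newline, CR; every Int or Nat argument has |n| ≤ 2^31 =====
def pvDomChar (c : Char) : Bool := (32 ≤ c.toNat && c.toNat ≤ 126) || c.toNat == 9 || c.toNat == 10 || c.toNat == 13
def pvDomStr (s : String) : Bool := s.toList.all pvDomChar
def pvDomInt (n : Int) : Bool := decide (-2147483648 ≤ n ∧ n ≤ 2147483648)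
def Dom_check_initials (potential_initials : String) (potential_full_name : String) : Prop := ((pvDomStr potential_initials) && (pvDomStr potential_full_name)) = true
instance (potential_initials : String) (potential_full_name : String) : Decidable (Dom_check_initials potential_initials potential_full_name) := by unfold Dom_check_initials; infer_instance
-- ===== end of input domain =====

-- B replaces A's length check plus pairwise early-return loop by joining each side's first letters into a string and comparing once (objective: simpler).

-- ===== PORT A =====
-- A's zip loop with early return False on a first-letter mismatch
def pvALoop : List (List Char) → List (List Char) → Bool
  | i :: is, n :: ns =>
      if PySem.List.pyGet? i 0 ≠ PySem.List.pyGet? n 0 then false else pvALoop is ns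
  | _, _ => true

def check_initials (potential_initials : String) (potential_full_name : String) : Bool :=
  let initials := (PySem.Chars.splitOn potential_initials.toList [' ']).filter (fun t => t ≠ [])
  let names := (PySem.Chars.splitOn potential_full_name.toList [' ']).filter (fun t => t ≠ [])
  if initials.length = names.length then pvALoop initials names else false

-- ===== PORT B =====
-- ''.join(t[0] for t in s.split(' ') if t): keep each nonempty token's first char
def pvFirstLetters (s : String) : String :=
  String.ofList ((PySem.Chars.splitOn s.toList [' ']).filterMap List.head?)

def check_initials_alt (potential_initials : String) (potential_full_name : String) : Bool :=
  pvFirstLetters potential_initials == pvFirstLetters potential_full_name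

-- ===== PRECONDITION & SPEC =====
def Spec_check_initials (potential_initials : String) (potential_full_name : String) (out : Bool) : Prop := out = check_initials_alt potential_initials potential_full_name
instance (potential_initials : String) (potential_full_name : String) (out : Bool) : Decidable (Spec_check_initials potential_initials potential_full_name out) := by unfold Spec_check_initials; infer_instance

-- ===== CLAIM (what is proved, stated in full; the proofs are below) =====
def Claim_equal_check_initials : Prop := ∀ (potential_initials : String) (potential_full_name : String), Dom_check_initials potential_initials potential_full_name → Spec_check_initials potential_initials potential_full_name (check_initials potential_initials potential_full_name)

-- ===== LEMMAS AND PROOFS =====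

-- filterMap head? skips exactly the empty tokens, i.e. equals filtering first
theorem pv_filterMap_head (ts : List (List Char)) :
    ts.filterMap List.head?
      = (ts.filter (fun t => t ≠ [])).filterMap List.head? := by
  induction ts with
  | nil => rfl
  | cons t ts ih =>
      cases t with
      | nil => simpa using ih
      | cons c cs => simp [ih]

-- the core: on lists of nonempty tokens, A's guarded loop equals equality of first-letter lists
theorem pv_loop_eq (is ns : List (List Char))
    (hi : ∀ t ∈ is, t ≠ []) (hn : ∀ t ∈ ns, t ≠ []) :
    (if is.length = ns.length then pvALoop is ns else false)
      = (is.filterMap List.head? == ns.filterMap List.head?) := by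
  induction is generalizing ns with
  | nil =>
      cases ns with
      | nil => rfl
      | cons n ns =>
          obtain ⟨cn, tn, rfl⟩ := List.exists_cons_of_ne_nil (hn n (by simp))
          simp
  | cons i is ih =>
      obtain ⟨ci, ti, rfl⟩ := List.exists_cons_of_ne_nil (hi i (List.mem_cons_self ..))
      cases ns with
      | nil => simp
      | cons n ns =>
          obtain ⟨cn, tn, rfl⟩ := List.exists_cons_of_ne_nil (hn n (List.mem_cons_self ..))
          have hrec := ih ns (fun t ht => hi t (List.mem_cons_of_mem _ ht))
            (fun t ht => hn t (List.mem_cons_of_mem _ ht))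
          by_cases hc : ci = cn
          · have hstep : pvALoop ((ci :: ti) :: is) ((cn :: tn) :: ns) = pvALoop is ns := by
              simp [pvALoop, hc]
            by_cases hl : is.length = ns.length <;> simp_all
          · have hstep : pvALoop ((ci :: ti) :: is) ((cn :: tn) :: ns) = false := by
              simp [pvALoop, hc]
            by_cases hl : is.length = ns.length <;> simp [hl, hstep, hc]

-- ===== VERDICT (by name: the statement is the Claim_ definition above) =====
theorem check_initials_spec : Claim_equal_check_initials := by
  intro pi pfn _
  unfold Spec_check_initials check_initials check_initials_alt pvFirstLetters
  rw [pv_filterMap_head (PySem.Chars.splitOn pi.toList [' ']),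
      pv_filterMap_head (PySem.Chars.splitOn pfn.toList [' '])]
  have hof : ∀ l r : List Char, (String.ofList l == String.ofList r) = (l == r) := by
    intro l r
    by_cases h : l = r
    · simp [h]
    · have hne : String.ofList l ≠ String.ofList r :=
        fun heq => h (by simpa using congrArg String.toList heq)
      simp [h, hne]
  rw [hof]
  exact pv_loop_eq _ _ (fun t ht => by simpa using (List.mem_filter.mp ht).2)
    (fun t ht => by simpa using (List.mem_filter.mp ht).2)
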